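-- pv_equiv track=rewrite | github.com/brianrez/large-afin-and-nlu | affirmative-interpretation-generation/mention_flag/mf_cal_3.py | find_neg_lists
-- ===== SOURCE A (Python) =====
-- def find_neg_lists(first_, second_, negations):
--     first_rev = first_.copy()[::-1]
--     second_rev = second_.copy()[::-1]
--     list_match = []
--     for i in range(len(first_rev)):
--         if first_rev[i] == second_rev[i]:
--             list_match.append(first_rev[i])
--         else:
--             break
--     # list_match = list_match[::-1]
--
--     for neg_list in negations:
--         neg_list_rev = neg_list.copy()[::-1]
--         if len(neg_list_rev) > len(list_match):
--             continue
--         else: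
--             if neg_list_rev == list_match[: len(neg_list_rev)]:
--                 return neg_list
--     return None
-- ===== SOURCE B (Python) =====
-- def find_neg_lists(first_, second_, negations):
--     def is_suffix(tail, seq):
--         return len(tail) <= len(seq) and seq[len(seq) - len(tail):] == tail
--     return next((neg for neg in negations
--                  if is_suffix(neg, first_) and is_suffix(neg, second_)), None)
-- ===== Notes on version B (the rewrite author's own statement) =====
-- stated objective: simpler
-- what changed: B eliminates A's precomputation of the common suffix (reversed copies plus a growing reversed match list) altogether: a negation qualifies exactly when it is a suffix of both input lists, so B is one find-first scan over negations with a direct is-suffix-of-both test per candidate.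
import Mathlib
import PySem

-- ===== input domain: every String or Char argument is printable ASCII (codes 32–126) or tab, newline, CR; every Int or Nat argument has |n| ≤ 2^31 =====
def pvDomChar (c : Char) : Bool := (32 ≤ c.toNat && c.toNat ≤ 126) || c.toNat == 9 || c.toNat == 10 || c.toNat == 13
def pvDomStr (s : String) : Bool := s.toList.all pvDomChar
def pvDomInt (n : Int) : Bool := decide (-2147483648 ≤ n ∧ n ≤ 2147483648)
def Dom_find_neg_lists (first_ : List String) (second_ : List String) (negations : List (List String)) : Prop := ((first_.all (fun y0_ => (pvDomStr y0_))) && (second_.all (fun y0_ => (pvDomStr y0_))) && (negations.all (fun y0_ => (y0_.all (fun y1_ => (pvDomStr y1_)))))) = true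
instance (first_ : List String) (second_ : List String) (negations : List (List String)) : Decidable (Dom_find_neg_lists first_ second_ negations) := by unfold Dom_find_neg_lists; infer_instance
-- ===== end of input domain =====

set_option maxRecDepth 8192


-- B drops A's common-suffix precomputation entirely: a negation is returned iff it is a
-- suffix of BOTH input lists, so B is a single find-first scan with that direct per-candidate
-- test (objective: simpler).

-- ===== PORT A =====
-- `for i in range(len(first_rev))` with break; i is always ≥ 0 so plain `l[i]?` is exact;
-- fuel counts the remaining range iterations.  `second_rev[i]` can be out of range: Python
-- raises IndexError there (excluded by Pre_), the port stops the loop.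
def fnlMatchLoop (fr sr : List String) : Nat → Nat → List String → List String
  | _, 0, acc => acc
  | i, fuel+1, acc =>
    match fr[i]?, sr[i]? with
    | some a, some b => if a = b then fnlMatchLoop fr sr (i+1) fuel (acc ++ [a]) else acc
    | _, _ => acc

def fnlNegLoop (lm : List String) : List (List String) → Option (List String)
  | [] => none
  | neg :: rest =>
    let negRev := neg.reverse            -- neg_list.copy()[::-1]
    if negRev.length > lm.length then fnlNegLoop lm rest
    else if negRev = lm.take negRev.length then some neg   -- list_match[: len(neg_list_rev)]
    else fnlNegLoop lm rest

def find_neg_lists (first_ : List String) (second_ : List String) (negations : List (List String)) : Option (List String) :=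
  let fr := first_.reverse               -- first_.copy()[::-1]
  let sr := second_.reverse              -- second_.copy()[::-1]
  let lm := fnlMatchLoop fr sr 0 fr.length []
  fnlNegLoop lm negations

-- ===== PORT B =====
-- is_suffix(tail, seq) = len(tail) <= len(seq) and seq[len(seq)-len(tail):] == tail
def altIsSuffix (tail seq : List String) : Bool :=
  decide (tail.length ≤ seq.length) && decide (seq.drop (seq.length - tail.length) = tail)

-- next((neg for neg in negations if …), None)  →  List.find?
def find_neg_lists_alt (first_ : List String) (second_ : List String) (negations : List (List String)) : Option (List String) :=
  negations.find? (fun neg => altIsSuffix neg first_ && altIsSuffix neg second_)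

-- ===== PRECONDITION & SPEC =====
-- Pre_ excludes exactly the inputs where Python A raises IndexError: second_ strictly
-- shorter than first_ while being a suffix of it (the matching loop runs past second_'s end).
def Pre_find_neg_lists (first_ : List String) (second_ : List String) (negations : List (List String)) : Prop :=
  ¬ (second_.length < first_.length ∧ first_.drop (first_.length - second_.length) = second_)
instance (first_ : List String) (second_ : List String) (negations : List (List String)) : Decidable (Pre_find_neg_lists first_ second_ negations) := by unfold Pre_find_neg_lists; infer_instance

def pvWitness_find_neg_lists : List String × List String × List (List String) :=
  (["i", "do", "not"], ["you", "do", "not"], [["not"], ["do", "not"]])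


def Spec_find_neg_lists (first_ : List String) (second_ : List String) (negations : List (List String)) (out : Option (List String)) : Prop := out = find_neg_lists_alt first_ second_ negations
instance (first_ : List String) (second_ : List String) (negations : List (List String)) (out : Option (List String)) : Decidable (Spec_find_neg_lists first_ second_ negations out) := by unfold Spec_find_neg_lists; infer_instance

-- ===== CLAIM (what is proved, stated in full; the proofs are below) =====
def Claim_equal_find_neg_lists : Prop := ∀ (first_ : List String) (second_ : List String) (negations : List (List String)), Dom_find_neg_lists first_ second_ negations → Pre_find_neg_lists first_ second_ negations → Spec_find_neg_lists first_ second_ negations (find_neg_lists first_ second_ negations)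


-- ===== LEMMAS AND PROOFS =====

-- reference: element-wise common prefix, stopping when either list ends or on mismatch
def fnlCP : List String → List String → List String
  | a :: as_, b :: bs => if a = b then a :: fnlCP as_ bs else []
  | _, _ => []

theorem fnlCP_nil_left (l : List String) : fnlCP [] l = [] := by cases l <;> rfl

theorem fnlCP_nil_right (l : List String) : fnlCP l [] = [] := by cases l <;> rfl

theorem fnlMatchLoop_eq : ∀ (fuel : Nat) (fr sr : List String) (i : Nat) (acc : List String),
    fuel = fr.length - i →
    fnlMatchLoop fr sr i fuel acc = acc ++ fnlCP (fr.drop i) (sr.drop i)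
  | 0, fr, sr, i, acc, h => by
      have : fr.drop i = [] := List.drop_eq_nil_of_le (by omega)
      simp [fnlMatchLoop, this, fnlCP_nil_left]
  | fuel+1, fr, sr, i, acc, h => by
      have hi : i < fr.length := by omega
      have hfr : fr[i]? = some fr[i] := List.getElem?_eq_getElem hi
      have hdf : fr.drop i = fr[i] :: fr.drop (i+1) := (List.getElem_cons_drop hi).symm
      by_cases hsi : i < sr.length
      · have hsr : sr[i]? = some sr[i] := List.getElem?_eq_getElem hsi
        have hds : sr.drop i = sr[i] :: sr.drop (i+1) := (List.getElem_cons_drop hsi).symm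
        by_cases heq : fr[i] = sr[i]
        · rw [show fnlMatchLoop fr sr i (fuel+1) acc
              = fnlMatchLoop fr sr (i+1) fuel (acc ++ [fr[i]]) by
                simp only [fnlMatchLoop]; rw [hfr, hsr]; simp [heq]]
          rw [fnlMatchLoop_eq fuel fr sr (i+1) (acc ++ [fr[i]]) (by omega)]
          rw [hdf, hds]; simp [fnlCP, heq]
        · rw [show fnlMatchLoop fr sr i (fuel+1) acc = acc by
                simp only [fnlMatchLoop]; rw [hfr, hsr]; simp [heq]]
          rw [hdf, hds]; simp [fnlCP, heq]
      · have hsr : sr[i]? = none := by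
          rw [List.getElem?_eq_none_iff]; omega
        have hds : sr.drop i = [] := List.drop_eq_nil_of_le (by omega)
        rw [show fnlMatchLoop fr sr i (fuel+1) acc = acc by
              simp only [fnlMatchLoop]; rw [hfr, hsr]]
        rw [hds]; simp [fnlCP_nil_right]

-- a list is a prefix of the elementwise common prefix iff it is a prefix of both lists
theorem prefix_fnlCP : ∀ (p xs ys : List String),
    p <+: fnlCP xs ys ↔ (p <+: xs ∧ p <+: ys)
  | [], xs, ys => by simp
  | a :: p, [], ys => by simp [fnlCP_nil_left]
  | a :: p, x :: xs, [] => by simp [fnlCP_nil_right]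
  | a :: p, x :: xs, y :: ys => by
      simp only [fnlCP]
      split_ifs with h
      · subst h
        simp only [List.cons_prefix_cons]
        rw [prefix_fnlCP p xs ys]
        tauto
      · constructor
        · intro hp; exact absurd hp (by simp)
        · rintro ⟨h1, h2⟩
          rw [List.cons_prefix_cons] at h1 h2
          exact absurd (show x = y by rw [← h1.1, h2.1]) h

-- Python's `len(tail) <= len(seq) and seq[len(seq)-len(tail):] == tail` tests suffixhood
theorem altIsSuffix_iff (tail seq : List String) :
    altIsSuffix tail seq = true ↔ tail <:+ seq := by
  unfold altIsSuffix
  simp only [Bool.and_eq_true, decide_eq_true_eq]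
  constructor
  · rintro ⟨_, he⟩
    exact he ▸ List.drop_suffix _ _
  · rintro ⟨t, rfl⟩
    refine ⟨by simp, ?_⟩
    have h : (t ++ tail).length - tail.length = t.length := by simp
    rw [h, List.drop_left]

-- A's per-candidate test on list_match is exactly "suffix of both inputs"
theorem fnlNegLoop_cond (neg first_ second_ : List String) :
    (¬ neg.reverse.length > (fnlCP first_.reverse second_.reverse).length ∧
      neg.reverse = (fnlCP first_.reverse second_.reverse).take neg.reverse.length)
    ↔ (altIsSuffix neg first_ && altIsSuffix neg second_) = true := by
  rw [Bool.and_eq_true, altIsSuffix_iff, altIsSuffix_iff,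
      ← List.reverse_prefix, ← List.reverse_prefix, ← prefix_fnlCP]
  constructor
  · rintro ⟨_, he⟩
    exact List.prefix_iff_eq_take.mpr he
  · intro hp
    refine ⟨?_, List.prefix_iff_eq_take.mp hp⟩
    have := hp.length_le
    omega

theorem fnlNegLoop_eq_find : ∀ (negs : List (List String)) (first_ second_ : List String),
    fnlNegLoop (fnlCP first_.reverse second_.reverse) negs
      = negs.find? (fun neg => altIsSuffix neg first_ && altIsSuffix neg second_)
  | [], _, _ => rfl
  | neg :: rest, first_, second_ => by
      have hcond := fnlNegLoop_cond neg first_ second_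
      have ih := fnlNegLoop_eq_find rest first_ second_
      simp only [fnlNegLoop, List.find?_cons]
      by_cases hb : (altIsSuffix neg first_ && altIsSuffix neg second_) = true
      · obtain ⟨h1, h2⟩ := hcond.mpr hb
        rw [if_neg h1, if_pos h2, hb]
      · rw [Bool.not_eq_true] at hb
        rw [hb]
        split_ifs with h1 h2
        · exact ih
        · exact absurd (hcond.mp ⟨h1, h2⟩) (by simp [hb])
        · exact ih

theorem ports_agree (first_ second_ : List String) (negations : List (List String)) :
    find_neg_lists first_ second_ negations = find_neg_lists_alt first_ second_ negations := by
  unfold find_neg_lists find_neg_lists_alt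
  have hmatch := fnlMatchLoop_eq first_.reverse.length first_.reverse second_.reverse 0 [] (by simp)
  simp only [List.drop_zero, List.nil_append] at hmatch
  simp only [hmatch]
  exact fnlNegLoop_eq_find negations first_ second_

-- ===== VERDICT (by name: the statement is the Claim_ definition above) =====
theorem find_neg_lists_spec : Claim_equal_find_neg_lists := by
  intro first_ second_ negations _ _
  exact ports_agree first_ second_ negations
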